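-- pv_equiv track=rewrite | github.com/hedingbo/Arxml2ExcelConverter | arxml2excel-copy.py | dec2hex
-- ===== SOURCE A (Python) =====
-- def dec2hex(string_num):
--     if string_num == '0':
--         return '0'
--     else:
--         base = [str(x) for x in range(10)] + [ chr(x) for x in range(ord('A'),ord('A')+6)]
--         num = int(string_num)
--         mid = []
--         while True:
--             if num == 0: break
--             num,rem = divmod(num, 16)
--             mid.append(base[rem])
--         return ''.join([str(x) for x in mid[::-1]])
-- ===== SOURCE B (Python) =====
-- _HEX = "0123456789ABCDEF"
--
-- def _hexrec(n):
--     # most-significant-digit first: no accumulator list, no reversal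
--     if n == 0:
--         return ''
--     q, r = divmod(n, 16)
--     return _hexrec(q) + _HEX[r]
--
-- def dec2hex(string_num):
--     if string_num == '0':
--         return '0'
--     return _hexrec(int(string_num))
-- ===== Notes on version B (the rewrite author's own statement) =====
-- stated objective: simpler
-- what changed: Replaces A's accumulate-digits-in-a-list-then-reverse-and-join loop by a recursive helper that emits hex digits most-significant-first (helper(n//16) + digit), so no intermediate list and no reversal; the precondition excludes non-int strings (A raises ValueError) and negative values (A's while-loop never terminates).
import Mathlib
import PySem

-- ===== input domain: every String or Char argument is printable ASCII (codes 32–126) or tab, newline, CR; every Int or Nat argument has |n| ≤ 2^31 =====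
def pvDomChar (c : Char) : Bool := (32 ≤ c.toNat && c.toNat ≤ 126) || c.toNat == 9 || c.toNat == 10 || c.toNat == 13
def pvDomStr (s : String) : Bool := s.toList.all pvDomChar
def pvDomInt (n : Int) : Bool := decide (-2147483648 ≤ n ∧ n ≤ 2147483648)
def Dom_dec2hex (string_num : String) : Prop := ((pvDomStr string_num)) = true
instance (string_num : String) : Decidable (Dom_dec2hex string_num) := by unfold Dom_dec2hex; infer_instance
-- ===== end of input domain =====

-- B replaces A's append-digits-then-reverse-and-join loop by a recursive helper that
-- emits hex digits most-significant-first; equivalence is about the return value only.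

-- ===== PORT A =====
-- base = [str(x) for x in range(10)] + [chr(x) for x in range(ord('A'), ord('A')+6)]
def pvBaseA : List String :=
  ((PySem.List.pyRange 0 10 1).map PySem.Int.toStr) ++
  ((PySem.List.pyRange 65 71 1).map (fun x => String.ofList [Char.ofNat x.toNat]))

-- the 'while True' loop; on Pre_ num ≥ 0, so Python's divmod(num,16) is Nat div/mod.
-- rem = num % 16 < 16 = len(base), so base[rem] never raises; .getD "" only totalizes.
def pvLoopA (num : Nat) (mid : List String) : List String :=
  if num = 0 then mid
  else pvLoopA (num / 16) (mid ++ [(PySem.List.pyGet? pvBaseA ((num % 16 : Nat) : Int)).getD ""])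
decreasing_by exact Nat.div_lt_self (Nat.pos_of_ne_zero (by assumption)) (by omega)

def dec2hex (string_num : String) : String :=
  if string_num = "0" then "0"
  else
    match PySem.Int.ofStr? string_num with
    | none => ""            -- int() raises ValueError here: excluded by Pre_
    | some num =>
      if num < 0 then ""    -- the while-loop never terminates here: excluded by Pre_
      else
        -- ''.join([str(x) for x in mid[::-1]]); str(x) on a str is x, mid[::-1] is reverse
        PySem.Str.join "" (((pvLoopA num.toNat []).reverse).map (fun x => x))

-- ===== PORT B =====
def pvHexDigits : String := "0123456789ABCDEF"

-- _hexrec(n): _HEX[r] is a one-char string, modelled as String.ofList of the char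
def pvHexRec (n : Nat) : String :=
  if n = 0 then ""
  else pvHexRec (n / 16) ++ String.ofList [(PySem.Str.pyGet? pvHexDigits ((n % 16 : Nat) : Int)).getD ' ']
decreasing_by exact Nat.div_lt_self (Nat.pos_of_ne_zero (by assumption)) (by omega)

def dec2hex_alt (string_num : String) : String :=
  if string_num = "0" then "0"
  else
    match PySem.Int.ofStr? string_num with
    | none => ""            -- int() raises ValueError here: excluded by Pre_
    | some num =>
      if num < 0 then ""    -- recursion never reaches 0 here (RecursionError): excluded by Pre_
      else pvHexRec num.toNat

-- ===== PRECONDITION & SPEC =====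
-- Pre_ excludes strings int() rejects (A raises ValueError) and negative values (A's
-- while-loop diverges, B's recursion raises RecursionError): A returns on no excluded input.
def Pre_dec2hex (string_num : String) : Prop :=
  (PySem.Int.ofStr? string_num).isSome = true ∧ 0 ≤ (PySem.Int.ofStr? string_num).getD 0
instance (string_num : String) : Decidable (Pre_dec2hex string_num) := by
  unfold Pre_dec2hex; infer_instance
def pvWitness_dec2hex : String := ("255")

def Spec_dec2hex (string_num : String) (out : String) : Prop := out = dec2hex_alt string_num
instance (string_num : String) (out : String) : Decidable (Spec_dec2hex string_num out) := by unfold Spec_dec2hex; infer_instance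

-- ===== CLAIM (what is proved, stated in full; the proofs are below) =====
def Claim_equal_dec2hex : Prop := ∀ (string_num : String), Dom_dec2hex string_num → Pre_dec2hex string_num → Spec_dec2hex string_num (dec2hex string_num)

-- ===== LEMMAS AND PROOFS =====

-- the loop only ever appends to mid
theorem pvLoopA_append (n : Nat) (mid : List String) :
    pvLoopA n mid = mid ++ pvLoopA n [] := by
  induction n using Nat.strong_induction_on generalizing mid with
  | _ n ih =>
    by_cases h : n = 0
    · simp [pvLoopA, h]
    · have hlt : n / 16 < n := Nat.div_lt_self (Nat.pos_of_ne_zero h) (by omega)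
      conv_lhs => rw [pvLoopA]
      conv_rhs => rw [pvLoopA]
      simp only [h, if_false]
      rw [ih _ hlt]
      conv_rhs => rw [ih _ hlt]
      simp

-- A's digit string and B's digit char agree on every remainder r < 16
theorem pvDigit_eq (r : Nat) (hr : r < 16) :
    ((PySem.List.pyGet? pvBaseA ((r : Nat) : Int)).getD "").toList =
      [(PySem.List.pyGet? pvHexDigits.toList ((r : Nat) : Int)).getD ' '] := by
  interval_cases r <;> decide

-- joining pieces with '' concatenates them
theorem pvJoin_flat (l : List (List Char)) : PySem.Chars.join [] l = l.flatten := by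
  induction l with
  | nil => rfl
  | cons x xs ih =>
    cases xs with
    | nil => simp [PySem.Chars.join_singleton]
    | cons y ys => rw [PySem.Chars.join_cons_cons, ih]; simp

theorem pvJoin_flat' (l : List (List Char)) :
    PySem.Chars.join "".toList l = l.flatten := pvJoin_flat l

theorem pvCore (n : Nat) :
    PySem.Str.join "" (((pvLoopA n []).reverse).map (fun x => x)) = pvHexRec n := by
  induction n using Nat.strong_induction_on with
  | _ n ih =>
    apply String.ext
    by_cases h : n = 0
    · subst h
      rw [pvLoopA, pvHexRec]
      simp [PySem.Str.toList_join]
    · have hlt : n / 16 < n := Nat.div_lt_self (Nat.pos_of_ne_zero h) (by omega)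
      conv_lhs => rw [pvLoopA]
      conv_rhs => rw [pvHexRec]
      simp only [h, if_false]
      rw [pvLoopA_append]
      have hih := congrArg String.toList (ih _ hlt)
      simp only [List.map_id', PySem.Str.toList_join, pvJoin_flat'] at hih ⊢
      simp only [List.reverse_append, List.map_append, List.flatten_append]
      rw [hih]
      simp [String.toList_append]
      have hc : ((n : Int) % 16) = (((n % 16 : Nat)) : Int) := by push_cast; ring
      rw [hc]
      exact pvDigit_eq (n % 16) (Nat.mod_lt _ (by omega))

-- ===== VERDICT (by name: the statement is the Claim_ definition above) =====
theorem dec2hex_spec : Claim_equal_dec2hex := by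
  intro s _ hpre
  unfold Spec_dec2hex dec2hex dec2hex_alt
  by_cases h0 : s = "0"
  · simp [h0]
  · simp only [h0, if_false]
    obtain ⟨hsome, hnn⟩ := hpre
    cases hv : PySem.Int.ofStr? s with
    | none => exact absurd hsome (by rw [hv]; simp)
    | some num =>
      rw [hv] at hnn
      simp only [Option.getD_some] at hnn
      simp only [not_lt.mpr hnn, if_false]
      exact pvCore num.toNat
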